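-- pv_equiv track=rewrite | github.com/ArinaIvanchuk/PYTHON_HW3 | task5.py | completion_negafib_list
-- ===== SOURCE A (Python) =====
-- def completion_negafib_list(list_fibonacci):
--     nega_list = []
--     for i in range(len(list_fibonacci)):
--
--         if i % 2 != 0:
--             nega_list.append(list_fibonacci[i])
--         else:
--             nega_list.append(list_fibonacci[i] * (-1))
--     return nega_list
-- ===== SOURCE B (Python) =====
-- def completion_negafib_list(list_fibonacci):
--     nega_list = list(list_fibonacci)
--     nega_list[::2] = [x * (-1) for x in nega_list[::2]]
--     return nega_list
-- ===== Notes on version B (the rewrite author's own statement) =====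
-- stated objective: simpler
-- what changed: Replaces the per-index loop with a parity branch by a shallow copy plus a strided-slice pass: take the even-index slice, negate it, and reassign it in place.
import Mathlib
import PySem

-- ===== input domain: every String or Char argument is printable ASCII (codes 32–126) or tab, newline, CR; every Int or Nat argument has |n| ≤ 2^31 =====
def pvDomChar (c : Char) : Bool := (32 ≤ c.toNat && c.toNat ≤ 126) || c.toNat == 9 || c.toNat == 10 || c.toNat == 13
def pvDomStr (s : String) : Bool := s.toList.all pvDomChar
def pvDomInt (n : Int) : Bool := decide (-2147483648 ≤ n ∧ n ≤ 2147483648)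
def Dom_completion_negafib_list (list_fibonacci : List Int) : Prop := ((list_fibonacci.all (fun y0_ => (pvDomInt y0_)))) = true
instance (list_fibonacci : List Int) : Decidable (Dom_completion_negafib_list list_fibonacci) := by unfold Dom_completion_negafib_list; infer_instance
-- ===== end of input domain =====

-- B replaces A's per-index parity-branch loop by a shallow copy plus a step-2 strided-slice
-- pass (negate xs[::2] and reassign it); objective: simpler. Return values only (A mutates nothing).

-- ===== PORT A =====
def completion_negafib_list (list_fibonacci : List Int) : List Int :=
  (PySem.List.pyRange 0 (PySem.List.len list_fibonacci) 1).foldl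
    (fun nega_list i =>
      if PySem.Int.mod i 2 ≠ 0 then
        nega_list ++ [PySem.List.pyGetD list_fibonacci i 0]
      else
        nega_list ++ [PySem.List.pyGetD list_fibonacci i 0 * (-1)])
    []

-- ===== PORT B =====
-- xs[::2] — the even-index strided slice; hand port (PySem.List.slice has no step), exact for step 2
def pvStride2 : List Int → List Int
  | [] => []
  | [x] => [x]
  | x :: _ :: rest => x :: pvStride2 rest

-- res[::2] = vs — strided-slice assignment; exact for step 2 when vs has the slice's length
def pvAssignStride2 : List Int → List Int → List Int
  | v :: vs, _ :: y :: rest => v :: y :: pvAssignStride2 vs rest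
  | v :: _, [_] => [v]
  | _, xs => xs

def completion_negafib_list_alt (list_fibonacci : List Int) : List Int :=
  let nega_list := list_fibonacci
  pvAssignStride2 ((pvStride2 nega_list).map (fun x => x * (-1))) nega_list

-- ===== PRECONDITION & SPEC =====
def Spec_completion_negafib_list (list_fibonacci : List Int) (out : List Int) : Prop := out = completion_negafib_list_alt list_fibonacci
instance (list_fibonacci : List Int) (out : List Int) : Decidable (Spec_completion_negafib_list list_fibonacci out) := by unfold Spec_completion_negafib_list; infer_instance

-- ===== CLAIM (what is proved, stated in full; the proofs are below) =====
def Claim_equal_completion_negafib_list : Prop := ∀ (list_fibonacci : List Int), Dom_completion_negafib_list list_fibonacci → Spec_completion_negafib_list list_fibonacci (completion_negafib_list list_fibonacci)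

-- ===== LEMMAS AND PROOFS =====

-- two-step recursion both sides reduce to
def pvNegEven : List Int → List Int
  | [] => []
  | [x] => [x * (-1)]
  | x :: y :: rest => x * (-1) :: y :: pvNegEven rest

lemma pvB_eq_negEven : ∀ l : List Int,
    pvAssignStride2 ((pvStride2 l).map (fun x => x * (-1))) l = pvNegEven l
  | [] => by simp [pvStride2, pvAssignStride2, pvNegEven]
  | [x] => by simp [pvStride2, pvAssignStride2, pvNegEven]
  | x :: y :: rest => by
    simp only [pvStride2, List.map_cons, pvAssignStride2, pvNegEven]
    rw [pvB_eq_negEven rest]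

lemma pvA_map_form : ∀ l : List Int,
    (List.range l.length).map
      (fun (k : Nat) => if ((k : Int)) % 2 ≠ 0 then l.getD k 0 else l.getD k 0 * (-1))
      = pvNegEven l
  | [] => by simp [pvNegEven]
  | [x] => by simp [pvNegEven]
  | x :: y :: rest => by
    have h := pvA_map_form rest
    have h2 : List.map (fun (k : Nat) =>
        if ((k : Int) + 1 + 1) % 2 = 1 then rest[k]?.getD 0 else -rest[k]?.getD 0)
        (List.range rest.length) = pvNegEven rest := by
      rw [← h]
      refine List.map_congr_left ?_
      intro k _
      have hmod2 : ((k : Int) + 1 + 1) % 2 = ((k : Int)) % 2 := by omega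
      simp [hmod2, List.getD_eq_getElem?_getD]
    simp only [List.length_cons, List.range_succ_eq_map, List.map_cons, List.map_map,
      Function.comp_def]
    simp [pvNegEven, h2]

lemma pvA_eq_negEven (l : List Int) : completion_negafib_list l = pvNegEven l := by
  unfold completion_negafib_list
  rw [show (fun (nega_list : List Int) (i : Int) =>
      if PySem.Int.mod i 2 ≠ 0 then nega_list ++ [PySem.List.pyGetD l i 0]
      else nega_list ++ [PySem.List.pyGetD l i 0 * (-1)])
    = (fun (nega_list : List Int) (i : Int) => nega_list ++
        [if PySem.Int.mod i 2 ≠ 0 then PySem.List.pyGetD l i 0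
         else PySem.List.pyGetD l i 0 * (-1)]) from by
    funext acc i; split <;> rfl]
  rw [PySem.List.foldl_append_singleton_eq_map]
  rw [show PySem.List.pyRange 0 (PySem.List.len l) 1
      = (List.range l.length).map (fun (k : Nat) => ((k : Nat) : Int)) by
    rw [PySem.List.pyRange_one]
    simp [PySem.List.len]]
  rw [List.map_map, ← pvA_map_form l]
  refine List.map_congr_left ?_
  intro k hk
  rw [List.mem_range] at hk
  have hmod : PySem.Int.mod ((k : Nat) : Int) 2 = ((k : Int)) % 2 :=
    PySem.Int.mod_eq_emod_of_pos (by omega)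
  have hget : PySem.List.pyGetD l ((k : Nat) : Int) 0 = l.getD k 0 :=
    PySem.List.pyGetD_natCast l k 0
  simp only [Function.comp, hmod, hget]

-- ===== VERDICT (by name: the statement is the Claim_ definition above) =====
theorem completion_negafib_list_spec : Claim_equal_completion_negafib_list := by
  intro l _
  unfold Spec_completion_negafib_list completion_negafib_list_alt
  rw [pvA_eq_negEven, pvB_eq_negEven]
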